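-- pv_equiv track=rewrite | github.com/SACGF/variantgrid | sync/shariant/shariant_upload.py | batch_iterator_end
-- ===== SOURCE A (Python) =====
-- from typing import Dict, Optional, Iterable, List, TypeVar, Union
--
-- T = TypeVar("T")
--
-- def batch_iterator_end(iterable: Iterable[T], batch_size: int = 10) -> Iterable[Union[List[T], bool]]:
--     """
--     Creates an iterator of list of T from an iterator of T, as well as providing a boolean to indicate if
--     this is the final batch
--     :param iterable: Iterable of T
--     :param batch_size: Max number of items allowed in a batch (all but the last batch should be this size)
--     :return: Union of list of T, and a boolean True if the batch is final, False otherwise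
--     """
--     batch = []
--     pending_batch = None
--     for record in iterable:
--         if pending_batch:
--             yield pending_batch, False
--             pending_batch = None
--
--         batch.append(record)
--         if len(batch) >= batch_size:
--             pending_batch = batch
--             batch = []
--
--     if pending_batch:
--         yield pending_batch, True
--     if batch:
--         yield batch, True
-- ===== SOURCE B (Python) =====
-- from itertools import islice
--
--
-- def batch_iterator_end(iterable, batch_size=10):
--     it = iter(iterable)
--     n = max(batch_size, 1)  # any batch_size <= 1 means one record per batch
--     batch = list(islice(it, n))
--     while batch:
--         nxt = list(islice(it, n))
--         yield batch, not nxt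
--         batch = nxt
-- ===== Notes on version B (the rewrite author's own statement) =====
-- stated objective: idiomatic
-- what changed: Replaces A's per-record append loop with a pending-batch holder by an islice-based whole-chunk peek-ahead: pull a full chunk at a time and flag it final when the next chunk is empty.
import Mathlib
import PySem

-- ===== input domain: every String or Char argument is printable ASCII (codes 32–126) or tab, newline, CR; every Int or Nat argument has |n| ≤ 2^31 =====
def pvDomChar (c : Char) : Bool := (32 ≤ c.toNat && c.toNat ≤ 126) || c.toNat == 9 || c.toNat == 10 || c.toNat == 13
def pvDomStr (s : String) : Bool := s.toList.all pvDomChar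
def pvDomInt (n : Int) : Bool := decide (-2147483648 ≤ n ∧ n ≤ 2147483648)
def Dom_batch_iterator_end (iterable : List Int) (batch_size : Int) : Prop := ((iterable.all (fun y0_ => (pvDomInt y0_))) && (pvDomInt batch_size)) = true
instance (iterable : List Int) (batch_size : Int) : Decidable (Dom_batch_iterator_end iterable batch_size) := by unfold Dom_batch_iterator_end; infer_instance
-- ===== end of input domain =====

-- B replaces A's per-record append loop (with a pending-batch holder) by a whole-chunk
-- take/drop peek-ahead chunker; equivalence of the two batchings is proved for all inputs.


-- ===== PORT A =====
-- A's `for record in iterable` loop, carrying its state (batch, pending_batch) and emitting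
-- yields in order.  `if pending_batch:` is ported as matching `some p`: pending_batch is only
-- ever set to a just-appended (hence nonempty) batch, so truthiness coincides with non-None.
def aLoop (batch_size : Int) (batch : List Int) (pending : Option (List Int)) :
    List Int → List (List Int × Bool)
  | [] =>
      (match pending with | some p => [(p, true)] | none => []) ++
      (if batch.isEmpty then [] else [(batch, true)])
  | record :: rest =>
      match pending with
      | some p =>
          let batch' := batch ++ [record]
          (p, false) ::
            (if batch_size ≤ (batch'.length : Int) then aLoop batch_size [] (some batch') rest
             else aLoop batch_size batch' none rest)
      | none =>
          let batch' := batch ++ [record]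
          if batch_size ≤ (batch'.length : Int) then aLoop batch_size [] (some batch') rest
          else aLoop batch_size batch' none rest

def batch_iterator_end (iterable : List Int) (batch_size : Int) : List (List Int × Bool) :=
  aLoop batch_size [] none iterable

-- ===== PORT B =====
-- Source B's while-loop: each step pulls a whole chunk of n = max(batch_size, 1) records
-- (list(islice(it, n)) = take/drop) and flags it final iff the next chunk is empty.
def bChunks (n : Nat) (xs : List Int) : List (List Int × Bool) :=
  match xs with
  | [] => []
  | x :: rest0 =>
      let batch := x :: rest0.take (n - 1)
      let nxt := rest0.drop (n - 1)
      (batch, nxt.isEmpty) :: bChunks n nxt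
termination_by xs.length
decreasing_by simp only [List.length_drop, List.length_cons]; omega

def batch_iterator_end_alt (iterable : List Int) (batch_size : Int) : List (List Int × Bool) :=
  bChunks (max batch_size 1).toNat iterable

-- ===== PRECONDITION & SPEC =====
def Spec_batch_iterator_end (iterable : List Int) (batch_size : Int) (out : List (List Int × Bool)) : Prop := out = batch_iterator_end_alt iterable batch_size
instance (iterable : List Int) (batch_size : Int) (out : List (List Int × Bool)) : Decidable (Spec_batch_iterator_end iterable batch_size out) := by unfold Spec_batch_iterator_end; infer_instance

-- ===== CLAIM (what is proved, stated in full; the proofs are below) =====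
def Claim_equal_batch_iterator_end : Prop := ∀ (iterable : List Int) (batch_size : Int), Dom_batch_iterator_end iterable batch_size → Spec_batch_iterator_end iterable batch_size (batch_iterator_end iterable batch_size)

-- ===== LEMMAS AND PROOFS =====

-- One full chunk at the front of the list is peeled off by bChunks.
theorem bChunks_cons (n : Nat) (c ys : List Int) (hc : c.length = n) (hn : 1 ≤ n) :
    bChunks n (c ++ ys) = (c, ys.isEmpty) :: bChunks n ys := by
  cases c with
  | nil => exfalso; simp at hc; omega
  | cons x b =>
      rw [bChunks.eq_def]
      simp only [List.cons_append]
      have hb : b.length = n - 1 := by simp at hc; omega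
      rw [← hb, List.take_left, List.drop_left]

-- A's loop, started with a partial batch (shorter than the chunk size) and no pending
-- batch, yields exactly B's chunking of the remaining records prepended with the batch.
theorem aLoop_eq_bChunks (bs : Int) (xs : List Int) : ∀ batch : List Int,
    batch.length + 1 ≤ (max bs 1).toNat →
    aLoop bs batch none xs = bChunks (max bs 1).toNat (batch ++ xs) := by
  induction xs with
  | nil =>
      intro batch h
      rw [aLoop, List.append_nil]
      cases batch with
      | nil => simp [bChunks]
      | cons x b =>
          rw [bChunks]
          have hb : b.length ≤ (max bs 1).toNat - 1 := by
            simp only [List.length_cons] at h; omega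
          simp [List.take_of_length_le hb, List.drop_eq_nil_of_le hb, bChunks]
  | cons r rest ih =>
      intro batch h
      rw [aLoop]
      have hn1 : 1 ≤ (max bs 1).toNat := by omega
      by_cases hc : bs ≤ ((batch ++ [r]).length : Int)
      · -- the batch just became full: its length is exactly n
        have hc' : bs ≤ (batch.length : Int) + 1 := by
          simpa using hc
        have hlen : (batch ++ [r]).length = (max bs 1).toNat := by
          simp only [List.length_append, List.length_cons, List.length_nil]
          omega
        simp only [hc, if_true]
        have hchunk : bChunks (max bs 1).toNat (batch ++ r :: rest)
            = ((batch ++ [r]), rest.isEmpty) :: bChunks (max bs 1).toNat rest := by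
          have he : batch ++ r :: rest = (batch ++ [r]) ++ rest := by simp
          rw [he, bChunks_cons _ (batch ++ [r]) rest hlen hn1]
        rw [hchunk]
        cases rest with
        | nil => rw [aLoop]; simp [bChunks]
        | cons r2 rest2 =>
            rw [aLoop]
            have hrec : aLoop bs [] none (r2 :: rest2) = bChunks (max bs 1).toNat (r2 :: rest2) := by
              simpa using ih [] (by simp)
            rw [aLoop] at hrec
            simp only [List.nil_append] at hrec ⊢
            simp only [List.isEmpty_cons]
            rw [hrec]
      · -- batch not yet full: keep accumulating
        simp only [hc, if_false]
        have hc' : (batch.length : Int) + 1 < bs := by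
          simp only [List.length_append, List.length_cons, List.length_nil] at hc
          push_cast at hc ⊢; omega
        have hlt : (batch ++ [r]).length + 1 ≤ (max bs 1).toNat := by
          simp only [List.length_append, List.length_cons, List.length_nil]
          omega
        rw [ih (batch ++ [r]) hlt]
        simp

-- ===== VERDICT (by name: the statement is the Claim_ definition above) =====
theorem batch_iterator_end_spec : Claim_equal_batch_iterator_end := by
  intro iterable batch_size _
  unfold Spec_batch_iterator_end batch_iterator_end batch_iterator_end_alt
  simpa using aLoop_eq_bChunks batch_size iterable [] (by simp)
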